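-- pv_equiv track=rewrite | github.com/castocolina/learn-cloud | src/python/prompt_manager.py | detect_multiline_paste
-- ===== SOURCE A (Python) =====
-- def detect_multiline_paste(input_text: str) -> bool:
--     """Detect if input has more than 5 consecutive empty lines (blank lines)"""
--     lines = input_text.split('\n')
--     consecutive_empty = 0
--     max_consecutive_empty = 0
--
--     for line in lines:
--         if not line.strip():  # Empty or whitespace-only line
--             consecutive_empty += 1
--             max_consecutive_empty = max(max_consecutive_empty, consecutive_empty)
--         else:
--             consecutive_empty = 0
--
--     return max_consecutive_empty > 5
-- ===== SOURCE B (Python) =====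
-- def detect_multiline_paste(input_text: str) -> bool:
--     """Detect if input has more than 5 consecutive empty lines (blank lines)"""
--     blanks = [not line.strip() for line in input_text.split('\n')]
--     return any(all(blanks[i:i + 6]) for i in range(len(blanks) - 5))
-- ===== Notes on version B (the rewrite author's own statement) =====
-- stated objective: alternative
-- what changed: Replaces the running counter + running maximum fold with a sliding-window existence check: B precomputes the blank flags once and asks whether any window of 6 consecutive lines is entirely blank.
import Mathlib
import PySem

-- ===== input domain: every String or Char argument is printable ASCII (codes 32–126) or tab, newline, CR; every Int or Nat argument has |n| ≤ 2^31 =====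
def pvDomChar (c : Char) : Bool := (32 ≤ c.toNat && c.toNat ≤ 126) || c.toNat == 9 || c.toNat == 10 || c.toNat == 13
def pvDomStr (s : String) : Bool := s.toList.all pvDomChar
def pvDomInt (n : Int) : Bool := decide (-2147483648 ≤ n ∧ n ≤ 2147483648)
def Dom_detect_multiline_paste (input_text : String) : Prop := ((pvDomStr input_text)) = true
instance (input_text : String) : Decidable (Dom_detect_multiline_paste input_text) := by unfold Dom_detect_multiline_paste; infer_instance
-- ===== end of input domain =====

-- B replaces A's running-counter/running-max fold with a sliding-window existence check
-- over precomputed blank flags (alternative decomposition, same return value).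

-- ===== PORT A =====
-- '\n' is a non-empty separator, so Python's split never raises: split? is always some.
def detect_multiline_paste (input_text : String) : Bool :=
  let lines := (PySem.Str.split? input_text "\n").getD []
  let st := lines.foldl
    (fun (st : Int × Int) line =>
      if PySem.Str.strip line == "" then (st.1 + 1, max st.2 (st.1 + 1))
      else (0, st.2))
    ((0 : Int), (0 : Int))
  decide (st.2 > 5)

-- ===== PORT B =====
def detect_multiline_paste_alt (input_text : String) : Bool :=
  let blanks := ((PySem.Str.split? input_text "\n").getD []).map
    (fun line => PySem.Str.strip line == "")
  (PySem.List.pyRange 0 ((blanks.length : Int) - 5) 1).any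
    (fun i => (PySem.List.slice blanks (some i) (some (i + 6))).all id)

-- ===== PRECONDITION & SPEC =====
def Spec_detect_multiline_paste (input_text : String) (out : Bool) : Prop := out = detect_multiline_paste_alt input_text
instance (input_text : String) (out : Bool) : Decidable (Spec_detect_multiline_paste input_text out) := by unfold Spec_detect_multiline_paste; infer_instance

-- ===== CLAIM (what is proved, stated in full; the proofs are below) =====
def Claim_equal_detect_multiline_paste : Prop := ∀ (input_text : String), Dom_detect_multiline_paste input_text → Spec_detect_multiline_paste input_text (detect_multiline_paste input_text)

-- ===== LEMMAS AND PROOFS =====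

/-- A's loop step, applied to the blank flag of a line. -/
def pvStep (st : Int × Int) (b : Bool) : Int × Int :=
  if b then (st.1 + 1, max st.2 (st.1 + 1)) else (0, st.2)

/-- `pvG bs k`: k more leading blanks complete a run of 6, or a full run of 6 occurs later. -/
def pvG : List Bool → Nat → Bool
  | _, 0 => true
  | [], _+1 => false
  | b :: t, k+1 => if b then pvG t k else pvG t 6

/-- Some window of 6 consecutive flags is all true. -/
def pvWin (bs : List Bool) : Prop :=
  ∃ i : Nat, i + 6 ≤ bs.length ∧ ((bs.drop i).take 6).all id = true

theorem pvWin_cons (b : Bool) (t : List Bool) :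
    pvWin (b :: t) ↔ (b = true ∧ 5 ≤ t.length ∧ (t.take 5).all id = true) ∨ pvWin t := by
  constructor
  · rintro ⟨i, hi, hall⟩
    cases i with
    | zero =>
      have he : (((b :: t).drop 0).take 6) = b :: t.take 5 := rfl
      rw [he, List.all_cons, Bool.and_eq_true] at hall
      exact Or.inl ⟨hall.1, by simp only [List.length_cons] at hi; omega, hall.2⟩
    | succ j =>
      exact Or.inr ⟨j, by simp only [List.length_cons] at hi; omega, hall⟩
  · rintro (⟨hb, hl, hall⟩ | ⟨i, hi, hall⟩)
    · refine ⟨0, by simp only [List.length_cons]; omega, ?_⟩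
      have he : (((b :: t).drop 0).take 6) = b :: t.take 5 := rfl
      rw [he, List.all_cons, Bool.and_eq_true]
      exact ⟨hb, hall⟩
    · exact ⟨i + 1, by simp only [List.length_cons]; omega, hall⟩

theorem pvG_iff (bs : List Bool) : ∀ k : Nat, k ≤ 6 →
    (pvG bs k = true ↔ (k ≤ bs.length ∧ (bs.take k).all id = true) ∨ pvWin bs) := by
  induction bs with
  | nil =>
    intro k _
    cases k with
    | zero => simp [pvG, pvWin]
    | succ j => simp [pvG, pvWin]
  | cons b t ih =>
    intro k hk
    cases k with
    | zero => simp [pvG]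
    | succ j =>
      rw [pvWin_cons]
      cases b with
      | false =>
        have h1 : pvG (false :: t) (j + 1) = pvG t 6 := rfl
        rw [h1, ih 6 (by omega)]
        constructor
        · rintro (⟨hl, hall⟩ | hw)
          · exact Or.inr (Or.inr ⟨0, by omega, hall⟩)
          · exact Or.inr (Or.inr hw)
        · rintro (⟨hl, hall⟩ | ⟨hb, _⟩ | hw)
          · rw [List.take_succ_cons, List.all_cons] at hall
            simp at hall
          · cases hb
          · exact Or.inr hw
      | true =>
        have h1 : pvG (true :: t) (j + 1) = pvG t j := rfl
        rw [h1, ih j (by omega)]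
        have h2 : ((true :: t).take (j + 1)).all id = (t.take j).all id := by
          rw [List.take_succ_cons, List.all_cons]; simp
        have h3 : (j + 1 ≤ (true :: t).length) ↔ j ≤ t.length := by
          simp only [List.length_cons]; omega
        constructor
        · rintro (⟨hl, hall⟩ | hw)
          · exact Or.inl ⟨h3.mpr hl, by rw [h2]; exact hall⟩
          · exact Or.inr (Or.inr hw)
        · rintro (⟨hl, hall⟩ | ⟨_, hl5, hall5⟩ | hw)
          · exact Or.inl ⟨h3.mp hl, by rw [h2] at hall; exact hall⟩
          · refine Or.inl ⟨by omega, ?_⟩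
            have hjt : t.take j = (t.take 5).take j := by
              rw [List.take_take, min_eq_left (by omega : j ≤ 5)]
            rw [hjt, List.all_eq_true] at *
            intro x hx
            exact hall5 x (List.mem_of_mem_take hx)
          · exact Or.inr hw

theorem pvFold_iff (bs : List Bool) : ∀ c m : Int, 0 ≤ c → c ≤ m →
    ((bs.foldl pvStep (c, m)).2 > 5 ↔ m > 5 ∨ pvG bs (6 - c).toNat = true) := by
  induction bs with
  | nil =>
    intro c m hc hcm
    by_cases h : 6 ≤ c
    · have h0 : (6 - c).toNat = 0 := by omega
      rw [List.foldl_nil, h0]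
      exact ⟨fun _ => Or.inr rfl, fun _ => by omega⟩
    · obtain ⟨j, hj⟩ : ∃ j : Nat, (6 - c).toNat = j + 1 := ⟨(5 - c).toNat, by omega⟩
      rw [List.foldl_nil, hj]
      constructor
      · intro hm; exact Or.inl hm
      · rintro (hm | hg)
        · exact hm
        · cases hg
  | cons b t ih =>
    intro c m hc hcm
    rw [List.foldl_cons]
    cases b with
    | false =>
      have hs : pvStep (c, m) false = (0, m) := rfl
      rw [hs, ih 0 m le_rfl (by omega), show ((6 : Int) - 0).toNat = 6 from rfl]
      by_cases h : 6 ≤ c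
      · have h0 : (6 - c).toNat = 0 := by omega
        rw [h0]
        exact ⟨fun _ => Or.inl (by omega), fun _ => Or.inl (by omega)⟩
      · obtain ⟨j, hj⟩ : ∃ j : Nat, (6 - c).toNat = j + 1 := ⟨(5 - c).toNat, by omega⟩
        rw [hj, show pvG (false :: t) (j + 1) = pvG t 6 from rfl]
    | true =>
      have hs : pvStep (c, m) true = (c + 1, max m (c + 1)) := rfl
      rw [hs, ih (c + 1) (max m (c + 1)) (by omega) (le_max_right _ _)]
      by_cases h6 : 6 ≤ c
      · have h0 : (6 - c).toNat = 0 := by omega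
        rw [h0]
        constructor
        · intro _; exact Or.inl (by omega)
        · intro _
          have := le_max_right m (c + 1)
          exact Or.inl (by omega)
      · by_cases h5 : c = 5
        · have h01 : (6 - c).toNat = 1 := by omega
          have h00 : (6 - (c + 1)).toNat = 0 := by omega
          have hz : ∀ l : List Bool, pvG l 0 = true := fun l => by cases l <;> rfl
          rw [h01, h00]
          constructor
          · intro _
            exact Or.inr (by rw [show pvG (true :: t) 1 = pvG t 0 from rfl]; exact hz t)
          · intro _; exact Or.inr (hz t)
        · have h0 : (6 - c).toNat = (6 - (c + 1)).toNat + 1 := by omega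
          rw [h0, show ∀ k, pvG (true :: t) (k + 1) = pvG t k from fun _ => rfl]
          constructor
          · rintro (hx | hx)
            · rcases max_choice m (c + 1) with hm | hm
              · rw [hm] at hx; exact Or.inl hx
              · rw [hm] at hx; omega
            · exact Or.inr hx
          · rintro (hx | hx)
            · exact Or.inl (by have := le_max_left m (c + 1); omega)
            · exact Or.inr hx

theorem pvAlt_iff (bs : List Bool) :
    ((PySem.List.pyRange 0 ((bs.length : Int) - 5) 1).any
      (fun i => (PySem.List.slice bs (some i) (some (i + 6))).all id) = true) ↔ pvWin bs := by
  rw [List.any_eq_true]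
  constructor
  · rintro ⟨i, hmem, hall⟩
    rw [PySem.List.mem_pyRange_one] at hmem
    obtain ⟨h0, h1⟩ := hmem
    refine ⟨i.toNat, by omega, ?_⟩
    rw [PySem.List.slice_toNat bs h0 (by omega)] at hall
    rwa [show (i + 6).toNat - i.toNat = 6 by omega] at hall
  · rintro ⟨i, hi, hall⟩
    refine ⟨(i : Int), ?_, ?_⟩
    · rw [PySem.List.mem_pyRange_one]; constructor <;> omega
    · rw [PySem.List.slice_toNat bs (by omega) (by omega),
        show ((i : Int) + 6).toNat - (i : Int).toNat = 6 by omega,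
        show ((i : Int)).toNat = i by omega]
      exact hall

theorem pvKey (bs : List Bool) :
    decide ((bs.foldl pvStep ((0 : Int), (0 : Int))).2 > 5)
      = (PySem.List.pyRange 0 ((bs.length : Int) - 5) 1).any
          (fun i => (PySem.List.slice bs (some i) (some (i + 6))).all id) := by
  have hA := pvFold_iff bs 0 0 le_rfl le_rfl
  rw [show ((6 : Int) - 0).toNat = 6 from rfl] at hA
  have hB := pvAlt_iff bs
  by_cases hw : pvWin bs
  · rw [decide_eq_true (hA.2 (Or.inr ((pvG_iff bs 6 le_rfl).2 (Or.inr hw)))), hB.2 hw]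
  · have hg : ¬ pvG bs 6 = true := fun h => by
      rcases (pvG_iff bs 6 le_rfl).1 h with ⟨hl6, hall⟩ | hw'
      · exact hw ⟨0, by omega, hall⟩
      · exact hw hw'
    have hna : ¬ (bs.foldl pvStep ((0 : Int), (0 : Int))).2 > 5 := fun h => by
      rcases hA.1 h with hm | hg'
      · omega
      · exact hg hg'
    rw [decide_eq_false hna, Bool.eq_false_iff.mpr (fun h => hw (hB.1 h))]

-- ===== VERDICT (by name: the statement is the Claim_ definition above) =====
theorem detect_multiline_paste_spec : Claim_equal_detect_multiline_paste := by
  intro input_text _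
  show detect_multiline_paste input_text = detect_multiline_paste_alt input_text
  unfold detect_multiline_paste detect_multiline_paste_alt
  show decide ((((PySem.Str.split? input_text "\n").getD []).foldl
        (fun (x : Int × Int) y => pvStep x (PySem.Str.strip y == "")) ((0 : Int), (0 : Int))).2 > 5)
      = (PySem.List.pyRange 0
          (((((PySem.Str.split? input_text "\n").getD []).map
              (fun line => PySem.Str.strip line == "")).length : Int) - 5) 1).any
          (fun i => (PySem.List.slice (((PySem.Str.split? input_text "\n").getD []).map
              (fun line => PySem.Str.strip line == "")) (some i) (some (i + 6))).all id)
  rw [← List.foldl_map]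
  exact pvKey _
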